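-- pv_equiv track=rewrite | github.com/weak-fox/longrun-agent | src/longrun_agent/improvement_cycle.py | _source_ids_from_claim_ids
-- ===== SOURCE A (Python) =====
-- from typing import Any
--
-- def _source_ids_from_claim_ids(
--     claim_ids: list[str],
--     claim_lookup: dict[str, dict[str, Any]],
-- ) -> list[str]:
--     result: list[str] = []
--     seen: set[str] = set()
--     for claim_id in claim_ids:
--         claim = claim_lookup.get(claim_id)
--         if claim is None:
--             continue
--         source_id = str(claim.get("source_id", "")).strip()
--         if not source_id or source_id in seen:
--             continue
--         seen.add(source_id)
--         result.append(source_id)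
--     return result
-- ===== SOURCE B (Python) =====
-- def _source_ids_from_claim_ids(claim_ids, claim_lookup):
--     # extraction pass: stripped, non-empty source ids in claim order
--     pending = [
--         s
--         for s in (
--             str(claim.get("source_id", "")).strip()
--             for claim in map(claim_lookup.get, claim_ids)
--             if claim is not None
--         )
--         if s
--     ]
--     # dedup by elimination: emit the head, then delete every later copy of it.
--     # Keeps first occurrences in order, so it matches a seen-set dedup, but needs
--     # no auxiliary membership structure at all.
--     out = []
--     while pending:
--         head = pending[0]
--         out.append(head)
--         pending = [s for s in pending[1:] if s != head]
--     return out
-- ===== Notes on version B (the rewrite author's own statement) =====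
-- stated objective: alternative
-- what changed: A's single loop with an auxiliary seen set is replaced by an extraction pass followed by dedup-by-elimination: repeatedly emit the head of the remaining list and filter out all its later copies, so no seen set or membership test against the output exists at all.
import Mathlib
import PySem

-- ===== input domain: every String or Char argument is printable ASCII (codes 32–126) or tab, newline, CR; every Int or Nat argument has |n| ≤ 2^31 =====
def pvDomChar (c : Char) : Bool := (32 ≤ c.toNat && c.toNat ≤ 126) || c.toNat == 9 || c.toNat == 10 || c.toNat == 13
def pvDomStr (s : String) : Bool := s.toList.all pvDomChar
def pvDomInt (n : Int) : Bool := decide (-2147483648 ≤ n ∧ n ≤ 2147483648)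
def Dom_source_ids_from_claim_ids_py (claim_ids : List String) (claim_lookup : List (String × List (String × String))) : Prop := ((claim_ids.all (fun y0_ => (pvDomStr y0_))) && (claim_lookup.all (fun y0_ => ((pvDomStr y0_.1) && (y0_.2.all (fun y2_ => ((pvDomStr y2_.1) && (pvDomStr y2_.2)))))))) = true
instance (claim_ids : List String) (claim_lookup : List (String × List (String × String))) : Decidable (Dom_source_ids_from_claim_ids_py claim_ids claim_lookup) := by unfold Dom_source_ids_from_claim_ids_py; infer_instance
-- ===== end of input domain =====

-- B replaces A's seen-set loop by an extraction pass plus dedup-by-elimination (emit the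
-- head, filter out its later copies); objective: alternative algorithm, same result.


-- ===== PORT A =====
-- literal port of A: one loop over claim_ids carrying (result, seen)
def source_ids_from_claim_ids_py (claim_ids : List String) (claim_lookup : List (String × List (String × String))) : List String :=
  (claim_ids.foldl
    (fun (st : List String × PySem.Set String) claim_id =>
      match PySem.Dict.get? (PySem.Dict.ofList claim_lookup) claim_id with
      | none => st
      | some claim =>
        let source_id := PySem.Str.strip (PySem.Dict.getD (PySem.Dict.ofList claim) "source_id" "")
        if source_id = "" ∨ source_id ∈ st.2 then st
        else (st.1 ++ [source_id], PySem.Set.add st.2 source_id))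
    ([], PySem.Set.empty)).1

-- ===== PORT B =====
-- B's while-loop: emit the head, drop every later copy of it, recurse on the rest
def pvDedupElim : List String → List String
  | [] => []
  | h :: t => h :: pvDedupElim (t.filter (fun s => s ≠ h))
termination_by l => l.length
decreasing_by simpa using Nat.lt_succ_of_le ((List.length_filter_le _ t.attach).trans (by simp))

-- literal port of B: extraction comprehension, then dedup-by-elimination
def source_ids_from_claim_ids_py_alt (claim_ids : List String) (claim_lookup : List (String × List (String × String))) : List String :=
  pvDedupElim
    (claim_ids.filterMap (fun claim_id =>
      match PySem.Dict.get? (PySem.Dict.ofList claim_lookup) claim_id with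
      | none => none
      | some claim =>
        let s := PySem.Str.strip (PySem.Dict.getD (PySem.Dict.ofList claim) "source_id" "")
        if s = "" then none else some s))

-- ===== PRECONDITION & SPEC =====
def Spec_source_ids_from_claim_ids_py (claim_ids : List String) (claim_lookup : List (String × List (String × String))) (out : List String) : Prop := out = source_ids_from_claim_ids_py_alt claim_ids claim_lookup
instance (claim_ids : List String) (claim_lookup : List (String × List (String × String))) (out : List String) : Decidable (Spec_source_ids_from_claim_ids_py claim_ids claim_lookup out) := by unfold Spec_source_ids_from_claim_ids_py; infer_instance

-- ===== CLAIM (what is proved, stated in full; the proofs are below) =====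
def Claim_equal_source_ids_from_claim_ids_py : Prop := ∀ (claim_ids : List String) (claim_lookup : List (String × List (String × String))), Dom_source_ids_from_claim_ids_py claim_ids claim_lookup → Spec_source_ids_from_claim_ids_py claim_ids claim_lookup (source_ids_from_claim_ids_py claim_ids claim_lookup)

-- ===== LEMMAS AND PROOFS =====

-- A's loop keeps result = seen (the same list); folding Set.add over B's extracted list
-- computes exactly that list.  Stated for an arbitrary common accumulator s.
theorem pv_loop_eq (claim_lookup : List (String × List (String × String))) :
    ∀ (cids : List String) (s : PySem.Set String),
      cids.foldl
        (fun (st : List String × PySem.Set String) claim_id =>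
          match PySem.Dict.get? (PySem.Dict.ofList claim_lookup) claim_id with
          | none => st
          | some claim =>
            let source_id := PySem.Str.strip (PySem.Dict.getD (PySem.Dict.ofList claim) "source_id" "")
            if source_id = "" ∨ source_id ∈ st.2 then st
            else (st.1 ++ [source_id], PySem.Set.add st.2 source_id))
        (s, s)
      =
      (let t := (cids.filterMap (fun claim_id =>
          match PySem.Dict.get? (PySem.Dict.ofList claim_lookup) claim_id with
          | none => none
          | some claim =>
            let source_id := PySem.Str.strip (PySem.Dict.getD (PySem.Dict.ofList claim) "source_id" "")
            if source_id = "" then none else some source_id)).foldl PySem.Set.add s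
       (t, t)) := by
  intro cids
  induction cids with
  | nil => intro s; simp
  | cons c rest ih =>
    intro s
    simp only [List.foldl_cons, List.filterMap_cons]
    cases h : PySem.Dict.get? (PySem.Dict.ofList claim_lookup) c with
    | none => simpa using ih s
    | some claim =>
      simp only []
      by_cases he : PySem.Str.strip (PySem.Dict.getD (PySem.Dict.ofList claim) "source_id" "") = ""
      · simpa [he] using ih s
      · by_cases hm : PySem.Str.strip (PySem.Dict.getD (PySem.Dict.ofList claim) "source_id" "") ∈ s
        · simpa [he, hm, PySem.Set.add_of_mem hm] using ih s
        · simpa [he, hm, PySem.Set.add_of_not_mem hm] using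
            ih (PySem.Set.add s (PySem.Str.strip (PySem.Dict.getD (PySem.Dict.ofList claim) "source_id" "")))

@[simp] theorem pvDedupElim_nil : pvDedupElim [] = [] := by rw [pvDedupElim]

@[simp] theorem pvDedupElim_cons (h : String) (t : List String) :
    pvDedupElim (h :: t) = h :: pvDedupElim (t.filter (fun s => s ≠ h)) := by
  rw [pvDedupElim]

-- folding Set.add over l starting from s appends exactly the elimination-dedup of the
-- elements of l not already in s
theorem pv_foldl_add_eq_dedupElim :
    ∀ (l : List String) (s : PySem.Set String),
      l.foldl PySem.Set.add s = s ++ pvDedupElim (l.filter (fun x => x ∉ s)) := by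
  intro l
  induction l with
  | nil => intro s; simp
  | cons h t ih =>
    intro s
    simp only [List.foldl_cons, List.filter_cons]
    by_cases hm : h ∈ s
    · simpa [hm, PySem.Set.add_of_mem hm] using ih s
    · have hstep : PySem.Set.add s h = s ++ [h] := PySem.Set.add_of_not_mem hm
      rw [hstep, ih (s ++ [h])]
      have hfe : t.filter (fun x => x ∉ s ++ [h])
          = (t.filter (fun x => x ∉ s)).filter (fun x => x ≠ h) := by
        rw [List.filter_filter]
        apply List.filter_congr
        intro x _
        by_cases hx : x = h <;> by_cases hxs : x ∈ s <;> simp [hx, hxs, hm]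
      rw [hfe]
      simp [hm, pvDedupElim_cons]

-- ===== VERDICT (by name: the statement is the Claim_ definition above) =====
theorem source_ids_from_claim_ids_py_spec : Claim_equal_source_ids_from_claim_ids_py := by
  intro claim_ids claim_lookup _
  show _ = _
  unfold source_ids_from_claim_ids_py source_ids_from_claim_ids_py_alt
  rw [show (PySem.Set.empty : PySem.Set String) = [] from rfl]
  rw [pv_loop_eq claim_lookup claim_ids []]
  simp [pv_foldl_add_eq_dedupElim]
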